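-- pv_equiv track=rewrite | github.com/moqucu/abadia-del-crimen-amstrad-cpc-disassembly | src/abadia/extract_sprites_corrected.py | decode_cpc_mode1_byte
-- ===== SOURCE A (Python) =====
-- def decode_cpc_mode1_byte(byte_val):
--     """
--     Decode a single byte in CPC Mode 1 format into 4 pixels
--     Bit layout: Pixel 0: bits 7,3; Pixel 1: bits 6,2; Pixel 2: bits 5,1; Pixel 3: bits 4,0
--     """
--     pixels = []
--     for pixel_num in range(4):
--         if pixel_num == 0:
--             pixel_value = ((byte_val >> 7) & 1) | ((byte_val >> 2) & 2)
--         elif pixel_num == 1: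
--             pixel_value = ((byte_val >> 6) & 1) | ((byte_val >> 1) & 2)
--         elif pixel_num == 2:
--             pixel_value = ((byte_val >> 5) & 1) | ((byte_val >> 0) & 2)
--         elif pixel_num == 3:
--             pixel_value = ((byte_val >> 4) & 1) | ((byte_val << 1) & 2)
--         pixels.append(pixel_value)
--     return pixels
-- ===== SOURCE B (Python) =====
-- # Precomputed 256-entry lookup table: each entry is the 4-pixel decoding of
-- # one byte value, built once at module load with the Mode 1 bit formula.
-- _LUT = []
-- for _b in range(256):
--     _LUT.append([
--         ((_b >> 7) & 1) | ((_b >> 2) & 2),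
--         ((_b >> 6) & 1) | ((_b >> 1) & 2),
--         ((_b >> 5) & 1) | (_b & 2),
--         ((_b >> 4) & 1) | ((_b << 1) & 2),
--     ])
--
--
-- def decode_cpc_mode1_byte(byte_val):
--     # only the low 8 bits matter, so reduce mod 256 and look the answer up
--     return list(_LUT[byte_val % 256])
-- ===== Notes on version B (the rewrite author's own statement) =====
-- stated objective: idiomatic
-- what changed: Per-call bit decoding (a 4-iteration loop of shift/mask/or operations) is replaced by a 256-entry lookup table built once at module load; the function body becomes a single mod-256 index into the table returning a fresh copy of the entry.
import Mathlib
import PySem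

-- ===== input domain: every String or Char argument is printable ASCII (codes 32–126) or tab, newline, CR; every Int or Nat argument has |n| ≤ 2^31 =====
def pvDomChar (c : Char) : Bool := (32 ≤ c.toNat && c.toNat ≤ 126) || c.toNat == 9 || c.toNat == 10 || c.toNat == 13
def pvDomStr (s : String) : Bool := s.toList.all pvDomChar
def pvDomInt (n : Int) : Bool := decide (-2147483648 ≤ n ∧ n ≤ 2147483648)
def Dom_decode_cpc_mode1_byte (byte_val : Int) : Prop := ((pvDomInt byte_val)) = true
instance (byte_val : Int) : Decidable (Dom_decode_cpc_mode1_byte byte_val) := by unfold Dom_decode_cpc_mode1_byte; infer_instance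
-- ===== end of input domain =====

-- B replaces A's per-call bit-decoding loop by a 256-entry table built once at module load; the call is a mod-256 lookup (idiomatic precomputed-table style).


-- ===== PORT A =====
def decode_cpc_mode1_byte (byte_val : Int) : List Int :=
  (PySem.List.pyRange 0 4 1).foldl (fun pixels (pixel_num : Int) =>
    pixels ++
      [ if pixel_num == 0 then
          PySem.Int.bor (PySem.Int.band (byte_val >>> (7:Nat)) 1) (PySem.Int.band (byte_val >>> (2:Nat)) 2)
        else if pixel_num == 1 then
          PySem.Int.bor (PySem.Int.band (byte_val >>> (6:Nat)) 1) (PySem.Int.band (byte_val >>> (1:Nat)) 2)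
        else if pixel_num == 2 then
          PySem.Int.bor (PySem.Int.band (byte_val >>> (5:Nat)) 1) (PySem.Int.band (byte_val >>> (0:Nat)) 2)
        else if pixel_num == 3 then
          PySem.Int.bor (PySem.Int.band (byte_val >>> (4:Nat)) 1) (PySem.Int.band (byte_val <<< (1:Nat)) 2)
        else 0 ]) []  -- the final else is unreachable: pixel_num ranges over 0..3

-- ===== PORT B =====
-- the 256-entry table built once at module load by Source B's setup loop
def pvLUT : List (List Int) :=
  List.map (fun (b : Nat) =>
    [ PySem.Int.bor (PySem.Int.band ((b : Int) >>> (7:Nat)) 1) (PySem.Int.band ((b : Int) >>> (2:Nat)) 2),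
      PySem.Int.bor (PySem.Int.band ((b : Int) >>> (6:Nat)) 1) (PySem.Int.band ((b : Int) >>> (1:Nat)) 2),
      PySem.Int.bor (PySem.Int.band ((b : Int) >>> (5:Nat)) 1) (PySem.Int.band (b : Int) 2),
      PySem.Int.bor (PySem.Int.band ((b : Int) >>> (4:Nat)) 1) (PySem.Int.band ((b : Int) <<< (1:Nat)) 2) ])
    (List.range 256)

def decode_cpc_mode1_byte_alt (byte_val : Int) : List Int :=
  -- _LUT[byte_val % 256]: the index is always in [0,256), so the default is never used
  PySem.List.pyGetD pvLUT (PySem.Int.mod byte_val 256) []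

-- ===== PRECONDITION & SPEC =====
def Spec_decode_cpc_mode1_byte (byte_val : Int) (out : List Int) : Prop := out = decode_cpc_mode1_byte_alt byte_val
instance (byte_val : Int) (out : List Int) : Decidable (Spec_decode_cpc_mode1_byte byte_val out) := by unfold Spec_decode_cpc_mode1_byte; infer_instance

-- ===== CLAIM (what is proved, stated in full; the proofs are below) =====
def Claim_equal_decode_cpc_mode1_byte : Prop := ∀ (byte_val : Int), Dom_decode_cpc_mode1_byte byte_val → Spec_decode_cpc_mode1_byte byte_val (decode_cpc_mode1_byte byte_val)

-- ===== LEMMAS AND PROOFS =====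

-- n & 2 on Nat, arithmetically
theorem pv_nat_and_two (n : Nat) : n &&& 2 = 2 * (n / 2 % 2) := by
  have h := Nat.and_two_pow n 1
  rw [Nat.testBit_eq_decide_div_mod_eq] at h
  norm_num at h
  by_cases h1 : n / 2 % 2 = 1
  · simp [h1] at h; omega
  · simp [h1] at h; omega

-- band x 1 is x's low bit, as floor arithmetic
theorem pv_band_one_arith (x : Int) : PySem.Int.band x 1 = x % 2 := by
  rw [PySem.Int.band_one, PySem.Int.mod_eq_emod_of_pos (by norm_num)]

-- band x 2 is x's bit 1, as floor arithmetic
theorem pv_band_two_arith (x : Int) : PySem.Int.band x 2 = x % 4 - x % 2 := by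
  rw [PySem.Int.band.eq_1]
  by_cases h : 0 ≤ x
  · rw [if_pos h, if_pos (by norm_num : (0:Int) ≤ 2)]
    rw [show (2:Int).toNat = 2 from rfl, pv_nat_and_two]
    omega
  · rw [if_neg h, if_pos (by norm_num : (0:Int) ≤ 2)]
    rw [show (2:Int).toNat = 2 from rfl, Nat.and_comm, pv_nat_and_two]
    omega

-- bor of a bit-0 value and a bit-1 value is their sum
theorem pv_bor_add (a b : Int) (ha : a = 0 ∨ a = 1) (hb : b = 0 ∨ b = 2) :
    PySem.Int.bor a b = a + b := by
  rcases ha with rfl | rfl <;> rcases hb with rfl | rfl <;> decide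

-- one pixel of the bit formula, as floor arithmetic
theorem pv_pixel_arith (x y : Int) (j : Nat) :
    PySem.Int.bor (PySem.Int.band (x >>> j) 1) (PySem.Int.band y 2)
      = (x / 2 ^ (j : Nat)) % 2 + (y % 4 - y % 2) := by
  rw [pv_bor_add _ _ (by rw [pv_band_one_arith]; omega)
        (by rw [pv_band_two_arith]; omega),
      pv_band_one_arith, pv_band_two_arith, Int.shiftRight_eq_div_pow]
  push_cast
  ring

-- evaluating A on the concrete range(4)
theorem pv_A_eval (x : Int) :
    decode_cpc_mode1_byte x =
      [ PySem.Int.bor (PySem.Int.band (x >>> (7:Nat)) 1) (PySem.Int.band (x >>> (2:Nat)) 2),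
        PySem.Int.bor (PySem.Int.band (x >>> (6:Nat)) 1) (PySem.Int.band (x >>> (1:Nat)) 2),
        PySem.Int.bor (PySem.Int.band (x >>> (5:Nat)) 1) (PySem.Int.band (x >>> (0:Nat)) 2),
        PySem.Int.bor (PySem.Int.band (x >>> (4:Nat)) 1) (PySem.Int.band (x <<< (1:Nat)) 2) ] := rfl

-- evaluating B: the lookup hits table entry x % 256
theorem pv_B_eval (x : Int) :
    decode_cpc_mode1_byte_alt x =
      [ PySem.Int.bor (PySem.Int.band (((x % 256).toNat : Int) >>> (7:Nat)) 1) (PySem.Int.band (((x % 256).toNat : Int) >>> (2:Nat)) 2),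
        PySem.Int.bor (PySem.Int.band (((x % 256).toNat : Int) >>> (6:Nat)) 1) (PySem.Int.band (((x % 256).toNat : Int) >>> (1:Nat)) 2),
        PySem.Int.bor (PySem.Int.band (((x % 256).toNat : Int) >>> (5:Nat)) 1) (PySem.Int.band ((x % 256).toNat : Int) 2),
        PySem.Int.bor (PySem.Int.band (((x % 256).toNat : Int) >>> (4:Nat)) 1) (PySem.Int.band (((x % 256).toNat : Int) <<< (1:Nat)) 2) ] := by
  unfold decode_cpc_mode1_byte_alt
  rw [PySem.Int.mod_eq_emod_of_pos (by norm_num)]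
  have h0 : 0 ≤ x % 256 := Int.emod_nonneg x (by norm_num)
  have h256 : x % 256 < 256 := Int.emod_lt_of_pos x (by norm_num)
  have hlen : (pvLUT).length = 256 := by
    unfold pvLUT; rw [List.length_map, List.length_range]
  rw [PySem.List.pyGetD_eq_getElem pvLUT [] h0 (by rw [hlen]; exact_mod_cast h256)]
  have hidx : (x % 256).toNat < 256 := by omega
  unfold pvLUT
  rw [List.getElem_map, List.getElem_range]

-- ===== VERDICT (by name: the statement is the Claim_ definition above) =====
theorem decode_cpc_mode1_byte_spec : Claim_equal_decode_cpc_mode1_byte := by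
  intro x _
  unfold Spec_decode_cpc_mode1_byte
  rw [pv_A_eval, pv_B_eval]
  have hcast : ((x % 256).toNat : Int) = x % 256 :=
    Int.toNat_of_nonneg (Int.emod_nonneg x (by norm_num))
  rw [hcast]
  have hsl : ∀ y : Int, y <<< (1:Nat) = 2 * y := by
    intro y; rw [Int.shiftLeft_eq]; ring
  have hs0 : ∀ y : Int, y >>> (0:Nat) = y := by
    intro y; rw [Int.shiftRight_eq_div_pow]; norm_num
  simp only [hsl, hs0]
  simp only [pv_pixel_arith]
  simp only [Int.shiftRight_eq_div_pow]
  norm_num [List.cons.injEq]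
  refine ⟨by omega, by omega, by omega, by omega⟩
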